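-- pv_equiv track=rewrite | github.com/wakkawarpman-oss/hanna-v3-2-clean | src/deep_recon_legacy.py | _simple_transliterate
-- ===== SOURCE A (Python) =====
-- _LATIN_TO_CYR = {
--     "a": "а", "b": "б", "v": "в", "g": "г", "d": "д",
--     "e": "е", "zh": "ж", "z": "з", "i": "і", "y": "й",
--     "k": "к", "l": "л", "m": "м", "n": "н", "o": "о",
--     "p": "п", "r": "р", "s": "с", "t": "т", "u": "у",
--     "f": "ф", "kh": "х", "ts": "ц", "ch": "ч", "sh": "ш",
--     "shch": "щ", "yu": "ю", "ya": "я", "h": "г",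
--     "nn": "нн",
-- }
--
-- def _simple_transliterate(text: str) -> str:
--     """Simple Latin → Cyrillic transliteration."""
--     result = []
--     i = 0
--     text_lower = text.lower()
--     while i < len(text_lower):
--         # Try multi-char mappings first (shch, sh, ch, zh, kh, ts, yu, ya)
--         matched = False
--         for length in (4, 3, 2):
--             chunk = text_lower[i:i + length]
--             if chunk in _LATIN_TO_CYR:
--                 result.append(_LATIN_TO_CYR[chunk])
--                 i += length
--                 matched = True
--                 break
--         if not matched:
--             ch = text_lower[i]
--             if ch in _LATIN_TO_CYR:
--                 result.append(_LATIN_TO_CYR[ch])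
--             else:
--                 result.append(ch)
--             i += 1
--     return "".join(result)
-- ===== SOURCE B (Python) =====
-- # B: first-char index with longest-first prefix matching replaces A's fixed (4,3,2) slice probing.
-- _INDEX = {
--     "a": [("a", "\u0430")], "b": [("b", "\u0431")], "v": [("v", "\u0432")],
--     "g": [("g", "\u0433")], "d": [("d", "\u0434")], "e": [("e", "\u0435")],
--     "z": [("zh", "\u0436"), ("z", "\u0437")],
--     "i": [("i", "\u0456")],
--     "y": [("yu", "\u044e"), ("ya", "\u044f"), ("y", "\u0439")],
--     "k": [("kh", "\u0445"), ("k", "\u043a")],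
--     "l": [("l", "\u043b")], "m": [("m", "\u043c")],
--     "n": [("nn", "\u043d\u043d"), ("n", "\u043d")],
--     "o": [("o", "\u043e")], "p": [("p", "\u043f")], "r": [("r", "\u0440")],
--     "s": [("shch", "\u0449"), ("sh", "\u0448"), ("s", "\u0441")],
--     "t": [("ts", "\u0446"), ("t", "\u0442")],
--     "u": [("u", "\u0443")], "f": [("f", "\u0444")],
--     "c": [("ch", "\u0447")],
--     "h": [("h", "\u0433")],
-- }
--
-- def _simple_transliterate(text: str) -> str:
--     t = text.lower()
--     out = []
--     i = 0
--     n = len(t)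
--     while i < n:
--         ch = t[i]
--         for key, val in _INDEX.get(ch, ()):
--             if t.startswith(key, i):
--                 out.append(val)
--                 i += len(key)
--                 break
--         else:
--             out.append(ch)
--             i += 1
--     return "".join(out)
-- ===== Notes on version B (the rewrite author's own statement) =====
-- stated objective: alternative
-- what changed: Replaced A's per-position probing of fixed-length slices (4,3,2) against the whole dict plus a separate single-char fallback by a precomputed first-char index whose bucket (keys sorted longest-first) is scanned with startswith, so each position does one hash lookup over a tiny candidate list.
import Mathlib
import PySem

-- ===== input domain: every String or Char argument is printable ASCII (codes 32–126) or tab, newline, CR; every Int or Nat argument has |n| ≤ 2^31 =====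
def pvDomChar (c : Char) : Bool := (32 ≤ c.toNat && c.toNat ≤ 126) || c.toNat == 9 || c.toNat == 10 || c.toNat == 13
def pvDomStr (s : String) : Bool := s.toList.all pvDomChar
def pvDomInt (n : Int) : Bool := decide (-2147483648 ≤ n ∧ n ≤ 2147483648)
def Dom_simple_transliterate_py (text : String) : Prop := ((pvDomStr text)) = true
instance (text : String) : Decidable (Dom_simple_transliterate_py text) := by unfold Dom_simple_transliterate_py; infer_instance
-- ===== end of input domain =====

-- B replaces A's fixed-length (4,3,2) slice probing by a first-char index scanned longest-first (objective: alternative).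

-- ===== PORT A =====
-- _LATIN_TO_CYR as an association list over the lowered characters (dict → assoc list, first match).
def latinTable : List (List Char × String) :=
  [(['a'], "а"), (['b'], "б"), (['v'], "в"), (['g'], "г"), (['d'], "д"),
   (['e'], "е"), (['z','h'], "ж"), (['z'], "з"), (['i'], "і"), (['y'], "й"),
   (['k'], "к"), (['l'], "л"), (['m'], "м"), (['n'], "н"), (['o'], "о"),
   (['p'], "п"), (['r'], "р"), (['s'], "с"), (['t'], "т"), (['u'], "у"),
   (['f'], "ф"), (['k','h'], "х"), (['t','s'], "ц"), (['c','h'], "ч"), (['s','h'], "ш"),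
   (['s','h','c','h'], "щ"), (['y','u'], "ю"), (['y','a'], "я"), (['h'], "г"),
   (['n','n'], "нн")]

-- 'chunk in dict / dict[chunk]' : first-match lookup in the table (exact for this duplicate-free dict).
def tabGet (k : List Char) : List (List Char × String) → Option String
  | [] => none
  | (k', v) :: t => if k = k' then some v else tabGet k t

-- A's while-loop over position i, carried as the remaining suffix: text_lower[i:i+L] = take L of the suffix.
def aLoop : List Char → List String
  | [] => []
  | c :: rest =>
    match tabGet ((c :: rest).take 4) latinTable with
    | some v => v :: aLoop (rest.drop 3)      -- i += 4
    | none =>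
      match tabGet ((c :: rest).take 3) latinTable with
      | some v => v :: aLoop (rest.drop 2)    -- i += 3
      | none =>
        match tabGet ((c :: rest).take 2) latinTable with
        | some v => v :: aLoop (rest.drop 1)  -- i += 2
        | none =>
          match tabGet [c] latinTable with
          | some v => v :: aLoop rest
          | none => String.ofList [c] :: aLoop rest
  termination_by l => l.length
  decreasing_by all_goals simp [List.length_drop]

def simple_transliterate_py (text : String) : String :=
  String.join (aLoop (PySem.Str.lower text).toList)

-- ===== PORT B =====
-- _INDEX: first char ↦ candidate (key, value) pairs, longest key first (dict → assoc list).
def bucketTable : List (Char × List (List Char × String)) :=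
  [('a', [(['a'], "а")]), ('b', [(['b'], "б")]), ('v', [(['v'], "в")]),
   ('g', [(['g'], "г")]), ('d', [(['d'], "д")]), ('e', [(['e'], "е")]),
   ('z', [(['z','h'], "ж"), (['z'], "з")]),
   ('i', [(['i'], "і")]),
   ('y', [(['y','u'], "ю"), (['y','a'], "я"), (['y'], "й")]),
   ('k', [(['k','h'], "х"), (['k'], "к")]),
   ('l', [(['l'], "л")]), ('m', [(['m'], "м")]),
   ('n', [(['n','n'], "нн"), (['n'], "н")]),
   ('o', [(['o'], "о")]), ('p', [(['p'], "п")]), ('r', [(['r'], "р")]),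
   ('s', [(['s','h','c','h'], "щ"), (['s','h'], "ш"), (['s'], "с")]),
   ('t', [(['t','s'], "ц"), (['t'], "т")]),
   ('u', [(['u'], "у")]), ('f', [(['f'], "ф")]),
   ('c', [(['c','h'], "ч")]),
   ('h', [(['h'], "г")])]

def bucketGet (c : Char) : List (Char × List (List Char × String)) → List (List Char × String)
  | [] => []                                   -- _INDEX.get(ch, ())
  | (c', b) :: t => if c = c' then b else bucketGet c t

-- the inner for/break: first key of the bucket that is a prefix at the current position
def scanBucket (l : List Char) : List (List Char × String) → Option (String × Nat)
  | [] => none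
  | (k, v) :: t => if k.isPrefixOf l then some (v, k.length) else scanBucket l t

-- B's while-loop, carried as the remaining suffix; 'i += len(key)' = drop (len-1) of rest (all keys are nonempty).
def bLoop : List Char → List String
  | [] => []
  | c :: rest =>
    match scanBucket (c :: rest) (bucketGet c bucketTable) with
    | some (v, len) => v :: bLoop (rest.drop (len - 1))
    | none => String.ofList [c] :: bLoop rest
  termination_by l => l.length
  decreasing_by all_goals simp [List.length_drop]

def simple_transliterate_py_alt (text : String) : String :=
  String.join (bLoop (PySem.Str.lower text).toList)

-- ===== PRECONDITION & SPEC =====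
def Spec_simple_transliterate_py (text : String) (out : String) : Prop := out = simple_transliterate_py_alt text
instance (text : String) (out : String) : Decidable (Spec_simple_transliterate_py text out) := by unfold Spec_simple_transliterate_py; infer_instance

-- ===== CLAIM (what is proved, stated in full; the proofs are below) =====
def Claim_equal_simple_transliterate_py : Prop := ∀ (text : String), Dom_simple_transliterate_py text → Spec_simple_transliterate_py text (simple_transliterate_py text)

-- ===== LEMMAS AND PROOFS =====

-- one-step unfoldings of the two loops (used to control simp)
lemma aLoop_cons (c : Char) (rest : List Char) : aLoop (c :: rest) =
    (match tabGet ((c :: rest).take 4) latinTable with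
    | some v => v :: aLoop (rest.drop 3)
    | none =>
      match tabGet ((c :: rest).take 3) latinTable with
      | some v => v :: aLoop (rest.drop 2)
      | none =>
        match tabGet ((c :: rest).take 2) latinTable with
        | some v => v :: aLoop (rest.drop 1)
        | none =>
          match tabGet [c] latinTable with
          | some v => v :: aLoop rest
          | none => String.ofList [c] :: aLoop rest) := by
  simp only [aLoop]

lemma bLoop_cons (c : Char) (rest : List Char) : bLoop (c :: rest) =
    (match scanBucket (c :: rest) (bucketGet c bucketTable) with
    | some (v, len) => v :: bLoop (rest.drop (len - 1))
    | none => String.ofList [c] :: bLoop rest) := by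
  simp only [bLoop]

lemma loop_eq : ∀ (n : Nat) (l : List Char), l.length ≤ n → aLoop l = bLoop l := by
  intro n
  induction n with
  | zero =>
    intro l h
    rcases l with _ | ⟨c, rest⟩
    · simp [aLoop, bLoop]
    · simp at h
  | succ n ihn =>
    intro l h
    rcases l with _ | ⟨c, rest⟩
    · simp [aLoop, bLoop]
    have ih : ∀ l' : List Char, l'.length ≤ rest.length → aLoop l' = bLoop l' := by
      intro l' h'; exact ihn l' (by simp only [List.length_cons] at h; omega)
    rw [aLoop_cons, bLoop_cons]
    by_cases ha : c = 'a'
    · subst ha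
      rcases rest with _ | ⟨c2, r2⟩
      · simp [tabGet, latinTable, bucketGet, bucketTable, scanBucket, List.isPrefixOf, List.cons_prefix_cons, aLoop, bLoop]
      · simp [tabGet, latinTable, bucketGet, bucketTable, scanBucket, List.isPrefixOf, List.cons_prefix_cons]
        apply ih; (try simp only [List.length_cons, List.length_drop, List.length_tail]); omega
    by_cases hb : c = 'b'
    · subst hb
      rcases rest with _ | ⟨c2, r2⟩
      · simp [tabGet, latinTable, bucketGet, bucketTable, scanBucket, List.isPrefixOf, List.cons_prefix_cons, aLoop, bLoop]
      · simp [tabGet, latinTable, bucketGet, bucketTable, scanBucket, List.isPrefixOf, List.cons_prefix_cons]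
        apply ih; (try simp only [List.length_cons, List.length_drop, List.length_tail]); omega
    by_cases hv : c = 'v'
    · subst hv
      rcases rest with _ | ⟨c2, r2⟩
      · simp [tabGet, latinTable, bucketGet, bucketTable, scanBucket, List.isPrefixOf, List.cons_prefix_cons, aLoop, bLoop]
      · simp [tabGet, latinTable, bucketGet, bucketTable, scanBucket, List.isPrefixOf, List.cons_prefix_cons]
        apply ih; (try simp only [List.length_cons, List.length_drop, List.length_tail]); omega
    by_cases hg : c = 'g'
    · subst hg
      rcases rest with _ | ⟨c2, r2⟩
      · simp [tabGet, latinTable, bucketGet, bucketTable, scanBucket, List.isPrefixOf, List.cons_prefix_cons, aLoop, bLoop]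
      · simp [tabGet, latinTable, bucketGet, bucketTable, scanBucket, List.isPrefixOf, List.cons_prefix_cons]
        apply ih; (try simp only [List.length_cons, List.length_drop, List.length_tail]); omega
    by_cases hd : c = 'd'
    · subst hd
      rcases rest with _ | ⟨c2, r2⟩
      · simp [tabGet, latinTable, bucketGet, bucketTable, scanBucket, List.isPrefixOf, List.cons_prefix_cons, aLoop, bLoop]
      · simp [tabGet, latinTable, bucketGet, bucketTable, scanBucket, List.isPrefixOf, List.cons_prefix_cons]
        apply ih; (try simp only [List.length_cons, List.length_drop, List.length_tail]); omega
    by_cases he : c = 'e'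
    · subst he
      rcases rest with _ | ⟨c2, r2⟩
      · simp [tabGet, latinTable, bucketGet, bucketTable, scanBucket, List.isPrefixOf, List.cons_prefix_cons, aLoop, bLoop]
      · simp [tabGet, latinTable, bucketGet, bucketTable, scanBucket, List.isPrefixOf, List.cons_prefix_cons]
        apply ih; (try simp only [List.length_cons, List.length_drop, List.length_tail]); omega
    by_cases hi : c = 'i'
    · subst hi
      rcases rest with _ | ⟨c2, r2⟩
      · simp [tabGet, latinTable, bucketGet, bucketTable, scanBucket, List.isPrefixOf, List.cons_prefix_cons, aLoop, bLoop]
      · simp [tabGet, latinTable, bucketGet, bucketTable, scanBucket, List.isPrefixOf, List.cons_prefix_cons]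
        apply ih; (try simp only [List.length_cons, List.length_drop, List.length_tail]); omega
    by_cases hl : c = 'l'
    · subst hl
      rcases rest with _ | ⟨c2, r2⟩
      · simp [tabGet, latinTable, bucketGet, bucketTable, scanBucket, List.isPrefixOf, List.cons_prefix_cons, aLoop, bLoop]
      · simp [tabGet, latinTable, bucketGet, bucketTable, scanBucket, List.isPrefixOf, List.cons_prefix_cons]
        apply ih; (try simp only [List.length_cons, List.length_drop, List.length_tail]); omega
    by_cases hm : c = 'm'
    · subst hm
      rcases rest with _ | ⟨c2, r2⟩
      · simp [tabGet, latinTable, bucketGet, bucketTable, scanBucket, List.isPrefixOf, List.cons_prefix_cons, aLoop, bLoop]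
      · simp [tabGet, latinTable, bucketGet, bucketTable, scanBucket, List.isPrefixOf, List.cons_prefix_cons]
        apply ih; (try simp only [List.length_cons, List.length_drop, List.length_tail]); omega
    by_cases ho : c = 'o'
    · subst ho
      rcases rest with _ | ⟨c2, r2⟩
      · simp [tabGet, latinTable, bucketGet, bucketTable, scanBucket, List.isPrefixOf, List.cons_prefix_cons, aLoop, bLoop]
      · simp [tabGet, latinTable, bucketGet, bucketTable, scanBucket, List.isPrefixOf, List.cons_prefix_cons]
        apply ih; (try simp only [List.length_cons, List.length_drop, List.length_tail]); omega
    by_cases hp : c = 'p'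
    · subst hp
      rcases rest with _ | ⟨c2, r2⟩
      · simp [tabGet, latinTable, bucketGet, bucketTable, scanBucket, List.isPrefixOf, List.cons_prefix_cons, aLoop, bLoop]
      · simp [tabGet, latinTable, bucketGet, bucketTable, scanBucket, List.isPrefixOf, List.cons_prefix_cons]
        apply ih; (try simp only [List.length_cons, List.length_drop, List.length_tail]); omega
    by_cases hr : c = 'r'
    · subst hr
      rcases rest with _ | ⟨c2, r2⟩
      · simp [tabGet, latinTable, bucketGet, bucketTable, scanBucket, List.isPrefixOf, List.cons_prefix_cons, aLoop, bLoop]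
      · simp [tabGet, latinTable, bucketGet, bucketTable, scanBucket, List.isPrefixOf, List.cons_prefix_cons]
        apply ih; (try simp only [List.length_cons, List.length_drop, List.length_tail]); omega
    by_cases hu : c = 'u'
    · subst hu
      rcases rest with _ | ⟨c2, r2⟩
      · simp [tabGet, latinTable, bucketGet, bucketTable, scanBucket, List.isPrefixOf, List.cons_prefix_cons, aLoop, bLoop]
      · simp [tabGet, latinTable, bucketGet, bucketTable, scanBucket, List.isPrefixOf, List.cons_prefix_cons]
        apply ih; (try simp only [List.length_cons, List.length_drop, List.length_tail]); omega
    by_cases hf : c = 'f'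
    · subst hf
      rcases rest with _ | ⟨c2, r2⟩
      · simp [tabGet, latinTable, bucketGet, bucketTable, scanBucket, List.isPrefixOf, List.cons_prefix_cons, aLoop, bLoop]
      · simp [tabGet, latinTable, bucketGet, bucketTable, scanBucket, List.isPrefixOf, List.cons_prefix_cons]
        apply ih; (try simp only [List.length_cons, List.length_drop, List.length_tail]); omega
    by_cases hh : c = 'h'
    · subst hh
      rcases rest with _ | ⟨c2, r2⟩
      · simp [tabGet, latinTable, bucketGet, bucketTable, scanBucket, List.isPrefixOf, List.cons_prefix_cons, aLoop, bLoop]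
      · simp [tabGet, latinTable, bucketGet, bucketTable, scanBucket, List.isPrefixOf, List.cons_prefix_cons]
        apply ih; (try simp only [List.length_cons, List.length_drop, List.length_tail]); omega
    by_cases hz : c = 'z'
    · subst hz
      rcases rest with _ | ⟨c2, r2⟩
      · simp [tabGet, latinTable, bucketGet, bucketTable, scanBucket, List.isPrefixOf, List.cons_prefix_cons, aLoop, bLoop]
      by_cases h2 : c2 = 'h'
      case neg =>
        simp [tabGet, latinTable, bucketGet, bucketTable, scanBucket, List.isPrefixOf, List.cons_prefix_cons, h2, Ne.symm h2]
        apply ih; (try simp only [List.length_cons, List.length_drop, List.length_tail]); omega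
      subst h2
      rcases r2 with _ | ⟨c3, r3⟩
      · simp [tabGet, latinTable, bucketGet, bucketTable, scanBucket, List.isPrefixOf, List.cons_prefix_cons, aLoop, bLoop]
      · simp [tabGet, latinTable, bucketGet, bucketTable, scanBucket, List.isPrefixOf, List.cons_prefix_cons]
        apply ih; (try simp only [List.length_cons, List.length_drop, List.length_tail]); omega
    by_cases hk : c = 'k'
    · subst hk
      rcases rest with _ | ⟨c2, r2⟩
      · simp [tabGet, latinTable, bucketGet, bucketTable, scanBucket, List.isPrefixOf, List.cons_prefix_cons, aLoop, bLoop]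
      by_cases h2 : c2 = 'h'
      case neg =>
        simp [tabGet, latinTable, bucketGet, bucketTable, scanBucket, List.isPrefixOf, List.cons_prefix_cons, h2, Ne.symm h2]
        apply ih; (try simp only [List.length_cons, List.length_drop, List.length_tail]); omega
      subst h2
      rcases r2 with _ | ⟨c3, r3⟩
      · simp [tabGet, latinTable, bucketGet, bucketTable, scanBucket, List.isPrefixOf, List.cons_prefix_cons, aLoop, bLoop]
      · simp [tabGet, latinTable, bucketGet, bucketTable, scanBucket, List.isPrefixOf, List.cons_prefix_cons]
        apply ih; (try simp only [List.length_cons, List.length_drop, List.length_tail]); omega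
    by_cases ht : c = 't'
    · subst ht
      rcases rest with _ | ⟨c2, r2⟩
      · simp [tabGet, latinTable, bucketGet, bucketTable, scanBucket, List.isPrefixOf, List.cons_prefix_cons, aLoop, bLoop]
      by_cases h2 : c2 = 's'
      case neg =>
        simp [tabGet, latinTable, bucketGet, bucketTable, scanBucket, List.isPrefixOf, List.cons_prefix_cons, h2, Ne.symm h2]
        apply ih; (try simp only [List.length_cons, List.length_drop, List.length_tail]); omega
      subst h2
      rcases r2 with _ | ⟨c3, r3⟩
      · simp [tabGet, latinTable, bucketGet, bucketTable, scanBucket, List.isPrefixOf, List.cons_prefix_cons, aLoop, bLoop]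
      · simp [tabGet, latinTable, bucketGet, bucketTable, scanBucket, List.isPrefixOf, List.cons_prefix_cons]
        apply ih; (try simp only [List.length_cons, List.length_drop, List.length_tail]); omega
    by_cases hn : c = 'n'
    · subst hn
      rcases rest with _ | ⟨c2, r2⟩
      · simp [tabGet, latinTable, bucketGet, bucketTable, scanBucket, List.isPrefixOf, List.cons_prefix_cons, aLoop, bLoop]
      by_cases h2 : c2 = 'n'
      case neg =>
        simp [tabGet, latinTable, bucketGet, bucketTable, scanBucket, List.isPrefixOf, List.cons_prefix_cons, h2, Ne.symm h2]
        apply ih; (try simp only [List.length_cons, List.length_drop, List.length_tail]); omega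
      subst h2
      rcases r2 with _ | ⟨c3, r3⟩
      · simp [tabGet, latinTable, bucketGet, bucketTable, scanBucket, List.isPrefixOf, List.cons_prefix_cons, aLoop, bLoop]
      · simp [tabGet, latinTable, bucketGet, bucketTable, scanBucket, List.isPrefixOf, List.cons_prefix_cons]
        apply ih; (try simp only [List.length_cons, List.length_drop, List.length_tail]); omega
    by_cases hc : c = 'c'
    · subst hc
      rcases rest with _ | ⟨c2, r2⟩
      · simp [tabGet, latinTable, bucketGet, bucketTable, scanBucket, List.isPrefixOf, List.cons_prefix_cons, aLoop, bLoop]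
      by_cases h2 : c2 = 'h'
      case neg =>
        simp [tabGet, latinTable, bucketGet, bucketTable, scanBucket, List.isPrefixOf, List.cons_prefix_cons, h2, Ne.symm h2]
        apply ih; (try simp only [List.length_cons, List.length_drop, List.length_tail]); omega
      subst h2
      rcases r2 with _ | ⟨c3, r3⟩
      · simp [tabGet, latinTable, bucketGet, bucketTable, scanBucket, List.isPrefixOf, List.cons_prefix_cons, aLoop, bLoop]
      · simp [tabGet, latinTable, bucketGet, bucketTable, scanBucket, List.isPrefixOf, List.cons_prefix_cons]
        apply ih; (try simp only [List.length_cons, List.length_drop, List.length_tail]); omega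
    by_cases hy : c = 'y'
    · subst hy
      rcases rest with _ | ⟨c2, r2⟩
      · simp [tabGet, latinTable, bucketGet, bucketTable, scanBucket, List.isPrefixOf, List.cons_prefix_cons, aLoop, bLoop]
      by_cases h2 : c2 = 'u'
      · subst h2
        rcases r2 with _ | ⟨c3, r3⟩
        · simp [tabGet, latinTable, bucketGet, bucketTable, scanBucket, List.isPrefixOf, List.cons_prefix_cons, aLoop, bLoop]
        · simp [tabGet, latinTable, bucketGet, bucketTable, scanBucket, List.isPrefixOf, List.cons_prefix_cons]
          apply ih; (try simp only [List.length_cons, List.length_drop, List.length_tail]); omega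
      by_cases h2a : c2 = 'a'
      · subst h2a
        rcases r2 with _ | ⟨c3, r3⟩
        · simp [tabGet, latinTable, bucketGet, bucketTable, scanBucket, List.isPrefixOf, List.cons_prefix_cons, aLoop, bLoop]
        · simp [tabGet, latinTable, bucketGet, bucketTable, scanBucket, List.isPrefixOf, List.cons_prefix_cons]
          apply ih; (try simp only [List.length_cons, List.length_drop, List.length_tail]); omega
      · simp [tabGet, latinTable, bucketGet, bucketTable, scanBucket, List.isPrefixOf, List.cons_prefix_cons, h2, Ne.symm h2, h2a, Ne.symm h2a]
        apply ih; (try simp only [List.length_cons, List.length_drop, List.length_tail]); omega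
    by_cases hs : c = 's'
    · subst hs
      rcases rest with _ | ⟨c2, r2⟩
      · simp [tabGet, latinTable, bucketGet, bucketTable, scanBucket, List.isPrefixOf, List.cons_prefix_cons, aLoop, bLoop]
      by_cases h2 : c2 = 'h'
      case neg =>
        simp [tabGet, latinTable, bucketGet, bucketTable, scanBucket, List.isPrefixOf, List.cons_prefix_cons, h2, Ne.symm h2]
        apply ih; (try simp only [List.length_cons, List.length_drop, List.length_tail]); omega
      subst h2
      rcases r2 with _ | ⟨c3, r3⟩
      · simp [tabGet, latinTable, bucketGet, bucketTable, scanBucket, List.isPrefixOf, List.cons_prefix_cons, aLoop, bLoop]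
      by_cases h3 : c3 = 'c'
      case neg =>
        simp [tabGet, latinTable, bucketGet, bucketTable, scanBucket, List.isPrefixOf, List.cons_prefix_cons, h3, Ne.symm h3]
        apply ih; (try simp only [List.length_cons, List.length_drop, List.length_tail]); omega
      subst h3
      rcases r3 with _ | ⟨c4, r4⟩
      · simp [tabGet, latinTable, bucketGet, bucketTable, scanBucket, List.isPrefixOf, List.cons_prefix_cons, aLoop, bLoop]
      by_cases h4 : c4 = 'h'
      case neg =>
        simp [tabGet, latinTable, bucketGet, bucketTable, scanBucket, List.isPrefixOf, List.cons_prefix_cons, h4, Ne.symm h4]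
        apply ih; (try simp only [List.length_cons, List.length_drop, List.length_tail]); omega
      subst h4
      simp [tabGet, latinTable, bucketGet, bucketTable, scanBucket, List.isPrefixOf, List.cons_prefix_cons]
      apply ih; (try simp only [List.length_cons, List.length_drop, List.length_tail]); omega
    · simp [tabGet, latinTable, bucketGet, bucketTable, scanBucket, List.isPrefixOf, List.cons_prefix_cons, ha, hb, hv, hg, hd, he, hi, hl, hm, ho, hp, hr, hu, hf, hh, hz, hk, ht, hn, hc, hy, hs]
      apply ih; (try simp only [List.length_cons, List.length_drop, List.length_tail]); omega

-- ===== VERDICT (by name: the statement is the Claim_ definition above) =====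
theorem simple_transliterate_py_spec : Claim_equal_simple_transliterate_py := by
  intro text _
  unfold Spec_simple_transliterate_py simple_transliterate_py simple_transliterate_py_alt
  rw [loop_eq (PySem.Str.lower text).toList.length _ le_rfl]
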